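-- pv_equiv track=rewrite | github.com/agustinfranco1/ayed1-2025-tps | TP3/ejercicio_2.py | matriz_h
-- ===== SOURCE A (Python) =====
-- from typing import List
--
-- def matriz_h(n: int) -> List[List[int]]:
--     """
--     Matriz H: valores consecutivos en columnas, zigzag vertical.
--
--     Pre: n debe ser positivo.
--
--     Post: Devuelve la matriz con patron correspondiente.
--     """
--     m = [[0 for _ in range(n)] for _ in range(n)]
--     valor = 1
--     for j in range(n):
--         if j % 2 == 0:
--             for i in range(n):
--                 m[i][j] = valor
--                 valor += 1
--         else:
--             for i in range(n - 1, -1, -1):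
--                 m[i][j] = valor
--                 valor += 1
--     return m
-- ===== SOURCE B (Python) =====
-- from typing import List
--
-- def matriz_h(n: int) -> List[List[int]]:
--     """Matriz H: closed-form per-cell formula instead of a running counter."""
--     return [[j * n + (i + 1 if j % 2 == 0 else n - i) for j in range(n)]
--             for i in range(n)]
-- ===== Notes on version B (the rewrite author's own statement) =====
-- stated objective: simpler
-- what changed: Replaces the running valor counter with forward/backward inner loops by a closed-form per-cell formula j*n + (i+1 on even columns, n-i on odd ones), built as one comprehension.
import Mathlib
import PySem

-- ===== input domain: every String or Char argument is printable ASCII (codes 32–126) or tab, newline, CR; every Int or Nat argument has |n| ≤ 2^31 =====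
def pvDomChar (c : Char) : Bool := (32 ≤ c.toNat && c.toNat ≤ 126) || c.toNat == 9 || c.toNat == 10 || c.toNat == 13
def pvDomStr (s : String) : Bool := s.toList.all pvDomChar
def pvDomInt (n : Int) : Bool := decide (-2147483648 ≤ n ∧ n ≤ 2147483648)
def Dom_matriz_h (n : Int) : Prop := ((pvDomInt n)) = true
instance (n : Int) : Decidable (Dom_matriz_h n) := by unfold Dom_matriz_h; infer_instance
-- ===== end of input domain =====

-- B replaces A's running counter with forward/backward inner loops by a closed-form
-- per-cell formula; objective: simpler.

-- ===== PORT A =====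
-- m[i][j] = v for the nonnegative in-range indices A uses (exact there)
def pvSetCell (m : List (List Int)) (i j : Int) (v : Int) : List (List Int) :=
  m.set i.toNat ((m.getD i.toNat []).set j.toNat v)

def matriz_h (n : Int) : List (List Int) :=
  ((PySem.List.pyRange 0 n 1).foldl
    (fun (st : List (List Int) × Int) j =>
      if PySem.Int.mod j 2 = 0 then
        (PySem.List.pyRange 0 n 1).foldl
          (fun st2 i => (pvSetCell st2.1 i j st2.2, st2.2 + 1)) st
      else
        (PySem.List.pyRange (n - 1) (-1) (-1)).foldl
          (fun st2 i => (pvSetCell st2.1 i j st2.2, st2.2 + 1)) st)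
    ((PySem.List.pyRange 0 n 1).map
       (fun _ => (PySem.List.pyRange 0 n 1).map (fun _ => (0 : Int))), 1)).1

-- ===== PORT B =====
def matriz_h_alt (n : Int) : List (List Int) :=
  (PySem.List.pyRange 0 n 1).map (fun i =>
    (PySem.List.pyRange 0 n 1).map (fun j =>
      j * n + (if PySem.Int.mod j 2 = 0 then i + 1 else n - i)))

-- ===== PRECONDITION & SPEC =====
def Spec_matriz_h (n : Int) (out : List (List Int)) : Prop := out = matriz_h_alt n
instance (n : Int) (out : List (List Int)) : Decidable (Spec_matriz_h n out) := by unfold Spec_matriz_h; infer_instance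

-- ===== CLAIM (what is proved, stated in full; the proofs are below) =====
def Claim_equal_matriz_h : Prop := ∀ (n : Int), Dom_matriz_h n → Spec_matriz_h n (matriz_h n)

-- ===== LEMMAS AND PROOFS =====

-- the intended value of cell (i, j)
def pvF (n : Int) (i j : Nat) : Int :=
  (j : Int) * n + (if j % 2 = 0 then (i : Int) + 1 else n - (i : Int))

-- an N×N matrix whose cell (i, j) is pvF where p holds and 0 elsewhere
def pvMat (n : Int) (N : Nat) (p : Nat → Nat → Bool) : List (List Int) :=
  (List.range N).map (fun i => (List.range N).map (fun j => if p i j then pvF n i j else 0))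

lemma pvMat_congr (n : Int) (N : Nat) (p q : Nat → Nat → Bool)
    (h : ∀ i j, i < N → j < N → p i j = q i j) : pvMat n N p = pvMat n N q := by
  unfold pvMat
  refine List.map_congr_left (fun i hi => ?_)
  refine List.map_congr_left (fun j hj => ?_)
  rw [List.mem_range] at hi hj
  rw [h i j hi hj]

lemma pvSetCell_pvMat (n : Int) (N : Nat) (p : Nat → Nat → Bool) (i0 j0 : Nat)
    (hi : i0 < N) (_hj : j0 < N) :
    pvSetCell (pvMat n N p) (i0 : Int) (j0 : Int) (pvF n i0 j0)
      = pvMat n N (fun i j => p i j || (i == i0 && j == j0)) := by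
  have hrow : (pvMat n N p).getD i0 []
      = (List.range N).map (fun j => if p i0 j then pvF n i0 j else 0) := by
    rw [List.getD_eq_getElem _ _ (by simp [pvMat]; omega)]
    simp [pvMat]
  unfold pvSetCell
  simp only [Int.toNat_natCast]
  rw [hrow]
  apply List.ext_getElem
  · simp [pvMat]
  intro i h1 h2
  have hiN : i < N := by simpa [pvMat] using h2
  rw [List.getElem_set]
  by_cases hii : i0 = i
  · subst hii
    rw [if_pos rfl]
    apply List.ext_getElem
    · simp [pvMat]
    intro j h3 h4
    have hjN : j < N := by
      simp only [List.length_set, List.length_map, List.length_range] at h3; omega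
    rw [List.getElem_set]
    simp only [pvMat, List.getElem_map, List.getElem_range]
    by_cases hjj : j0 = j
    · subst hjj
      simp
    · simp [if_neg hjj, Ne.symm hjj]
  · simp only [if_neg hii, pvMat, List.getElem_map, List.getElem_range]
    refine List.map_congr_left (fun j hjm => ?_)
    have : (i == i0) = false := by simp; omega
    simp [this]

lemma pv_inner_even (n : Int) (N k : Nat) (hk : k < N) (hke : k % 2 = 0)
    (t : Nat) (ht : t ≤ N) :
    ((PySem.List.pyRange 0 (t : Int) 1).foldl
        (fun (st2 : List (List Int) × Int) i => (pvSetCell st2.1 i (k : Int) st2.2, st2.2 + 1))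
        (pvMat n N (fun _ j => decide (j < k)), (k : Int) * n + 1))
      = (pvMat n N (fun i j => decide (j < k) || (j == k && decide (i < t))),
         (k : Int) * n + 1 + t) := by
  induction t with
  | zero =>
    rw [PySem.List.pyRange_one_eq_nil (by omega)]
    simp only [List.foldl_nil, Nat.cast_zero, add_zero]
    refine Prod.ext ?_ rfl
    apply pvMat_congr
    intro i j _ _
    rw [Bool.eq_iff_iff]
    simp only [Bool.or_eq_true, Bool.and_eq_true, beq_iff_eq, decide_eq_true_eq]
    omega
  | succ t ih =>
    have ht' : t ≤ N := by omega
    rw [show (((t + 1 : Nat)) : Int) = (t : Int) + 1 by push_cast; ring,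
        PySem.List.pyRange_one_succ_right (by positivity),
        List.foldl_append, ih ht']
    simp only [List.foldl_cons, List.foldl_nil]
    have hval : (k : Int) * n + 1 + (t : Int) = pvF n t k := by
      unfold pvF
      rw [if_pos hke]
      ring
    rw [hval, pvSetCell_pvMat n N _ t k (by omega) hk]
    refine Prod.ext ?_ ?_
    · apply pvMat_congr
      intro i j hi hj
      rw [Bool.eq_iff_iff]
      simp only [Bool.or_eq_true, Bool.and_eq_true, beq_iff_eq, decide_eq_true_eq]
      omega
    · rw [← hval]; push_cast; ring

lemma pv_inner_odd (n : Int) (N k : Nat) (hn : n = (N : Int)) (hk : k < N) (hko : k % 2 = 1)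
    (t : Nat) (ht : t ≤ N) :
    ((PySem.List.pyRange ((t : Int) - 1) (-1) (-1)).foldl
        (fun (st2 : List (List Int) × Int) i => (pvSetCell st2.1 i (k : Int) st2.2, st2.2 + 1))
        (pvMat n N (fun i j => decide (j < k) || (j == k && decide (t ≤ i))),
         (k : Int) * n + 1 + ((N : Int) - (t : Int))))
      = (pvMat n N (fun _ j => decide (j < k + 1)), (k : Int) * n + 1 + (N : Int)) := by
  induction t with
  | zero =>
    rw [show ((0 : Nat) : Int) - 1 = -1 by norm_num,
        PySem.List.pyRange_neg_one_eq_nil (by norm_num)]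
    simp only [List.foldl_nil, Nat.cast_zero, sub_zero]
    refine Prod.ext ?_ rfl
    apply pvMat_congr
    intro i j _ _
    rw [Bool.eq_iff_iff]
    simp only [Bool.or_eq_true, Bool.and_eq_true, beq_iff_eq, decide_eq_true_eq]
    omega
  | succ t ih =>
    have hval : (k : Int) * n + 1 + ((N : Int) - ((t + 1 : Nat) : Int)) = pvF n t k := by
      unfold pvF
      rw [if_neg (by omega)]
      subst hn
      push_cast
      ring
    rw [show (((t + 1 : Nat)) : Int) - 1 = (t : Int) by push_cast; ring,
        PySem.List.pyRange_neg_one_cons (by omega),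
        List.foldl_cons, hval, pvSetCell_pvMat n N _ t k (by omega) hk]
    have hm : pvMat n N
        (fun i j => (decide (j < k) || (j == k && decide (t + 1 ≤ i))) || (i == t && j == k))
        = pvMat n N (fun i j => decide (j < k) || (j == k && decide (t ≤ i))) := by
      apply pvMat_congr
      intro i j _ _
      rw [Bool.eq_iff_iff]
      simp only [Bool.or_eq_true, Bool.and_eq_true, beq_iff_eq, decide_eq_true_eq]
      omega
    have hv2 : pvF n t k + 1 = (k : Int) * n + 1 + ((N : Int) - (t : Int)) := by
      unfold pvF
      rw [if_neg (by omega)]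
      subst hn
      ring
    rw [hm, hv2]
    exact ih (by omega)

lemma pv_outer (n : Int) (N : Nat) (hn : n = (N : Int)) (k : Nat) (hk : k ≤ N) :
    ((PySem.List.pyRange 0 (k : Int) 1).foldl
        (fun (st : List (List Int) × Int) j =>
          if PySem.Int.mod j 2 = 0 then
            (PySem.List.pyRange 0 n 1).foldl
              (fun st2 i => (pvSetCell st2.1 i j st2.2, st2.2 + 1)) st
          else
            (PySem.List.pyRange (n - 1) (-1) (-1)).foldl
              (fun st2 i => (pvSetCell st2.1 i j st2.2, st2.2 + 1)) st)
        (pvMat n N (fun _ _ => false), 1))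
      = (pvMat n N (fun _ j => decide (j < k)), (k : Int) * n + 1) := by
  subst hn
  induction k with
  | zero =>
    rw [show PySem.List.pyRange 0 ((0 : Nat) : Int) 1 = [] from
          PySem.List.pyRange_one_eq_nil (by norm_num)]
    simp only [List.foldl_nil, Nat.cast_zero, zero_mul, zero_add]
    refine Prod.ext ?_ rfl
    apply pvMat_congr
    intro i j _ _
    rw [Bool.eq_iff_iff]
    simp
  | succ k ih =>
    have hkN : k < N := by omega
    rw [show PySem.List.pyRange 0 ((k + 1 : Nat) : Int) 1
          = PySem.List.pyRange 0 ((k : Nat) : Int) 1 ++ [((k : Nat) : Int)] by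
        rw [show (((k + 1 : Nat)) : Int) = (k : Int) + 1 by push_cast; ring]
        exact PySem.List.pyRange_one_succ_right (by positivity),
      List.foldl_append, ih (by omega), List.foldl_cons, List.foldl_nil]
    have hmod : PySem.Int.mod (k : Int) 2 = ((k % 2 : Nat) : Int) := by
      rw [show (2 : Int) = ((2 : Nat) : Int) by norm_num, PySem.Int.mod_natCast]
    rcases Nat.mod_two_eq_zero_or_one k with he | ho
    · rw [if_pos (by rw [hmod, he]; norm_num),
          pv_inner_even ((N : Nat) : Int) N k hkN he N (le_refl N)]
      refine Prod.ext ?_ ?_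
      · apply pvMat_congr
        intro i j hi hj
        rw [Bool.eq_iff_iff]
        simp only [Bool.or_eq_true, Bool.and_eq_true, beq_iff_eq, decide_eq_true_eq]
        omega
      · push_cast; ring
    · rw [if_neg (by rw [hmod, ho]; norm_num)]
      have hm : pvMat ((N : Nat) : Int) N (fun _ j => decide (j < k))
          = pvMat ((N : Nat) : Int) N
              (fun i j => decide (j < k) || (j == k && decide (N ≤ i))) := by
        apply pvMat_congr
        intro i j hi _
        rw [Bool.eq_iff_iff]
        simp only [Bool.or_eq_true, Bool.and_eq_true, beq_iff_eq, decide_eq_true_eq]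
        omega
      have hv : (k : Int) * ((N : Nat) : Int) + 1
          = (k : Int) * ((N : Nat) : Int) + 1 + (((N : Nat) : Int) - ((N : Nat) : Int)) := by
        ring
      rw [hm, hv, pv_inner_odd ((N : Nat) : Int) N k rfl hkN ho N (le_refl N)]
      refine Prod.ext rfl ?_
      push_cast; ring

theorem matriz_h_spec : Claim_equal_matriz_h := by
  intro n _
  unfold Spec_matriz_h matriz_h matriz_h_alt
  by_cases hpos : 0 < n
  · obtain ⟨N, hN⟩ : ∃ N : Nat, n = (N : Int) :=
      ⟨n.toNat, (Int.toNat_of_nonneg (le_of_lt hpos)).symm⟩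
    subst hN
    have hm0 : (PySem.List.pyRange 0 (N : Int) 1).map
        (fun _ => (PySem.List.pyRange 0 (N : Int) 1).map (fun _ => (0 : Int)))
        = pvMat ((N : Nat) : Int) N (fun _ _ => false) := by
      simp [pvMat, PySem.List.pyRange_one, List.map_map, Function.comp_def, List.map_const', List.length_range]
    rw [hm0, pv_outer ((N : Nat) : Int) N rfl N (le_refl N)]
    unfold pvMat
    rw [PySem.List.pyRange_one]
    simp only [sub_zero, Int.toNat_natCast, List.map_map]
    refine List.map_congr_left (fun i hi => ?_)
    refine List.map_congr_left (fun j hj => ?_)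
    rw [List.mem_range] at hi hj
    have hmod : PySem.Int.mod ((j : Nat) : Int) 2 = ((j % 2 : Nat) : Int) := by
      rw [show (2 : Int) = ((2 : Nat) : Int) by norm_num, PySem.Int.mod_natCast]
    simp only [Function.comp, zero_add, decide_eq_true_eq]
    rw [if_pos hj]
    unfold pvF
    by_cases hp : j % 2 = 0
    · rw [if_pos hp, if_pos (show PySem.Int.mod ((j : Nat) : Int) 2 = 0 by
        rw [hmod, hp]; norm_num)]
    · rw [if_neg hp, if_neg (show ¬ PySem.Int.mod ((j : Nat) : Int) 2 = 0 by
        rw [hmod]; intro hc; exact hp (by exact_mod_cast hc))]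
  · rw [PySem.List.pyRange_one_eq_nil (by omega)]
    simp
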